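-- pv_equiv track=rewrite | github.com/semicontinuity/datatools | datatools/jt/llmcodec/string_utils.py | split_meta
-- ===== SOURCE A (Python) =====
-- def split_meta(text: str) -> tuple[list[str], list[str]]:
--     """Split on newlines."""
--     parts = []
--     seps = []
--     last_end = 0
--     for i, c in enumerate(text):
--         if c == "\n":
--             parts.append(text[last_end:i])
--             seps.append("\n")
--             last_end = i + 1
--     parts.append(text[last_end:])
--     return parts, seps
-- ===== SOURCE B (Python) =====
-- def split_meta(text: str) -> tuple[list[str], list[str]]:
--     """Split on newlines."""
--     cuts = [i for i, c in enumerate(text) if c == "\n"]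
--     starts = [0] + [i + 1 for i in cuts]
--     ends = cuts + [len(text)]
--     parts = [text[s:e] for s, e in zip(starts, ends)]
--     return parts, ["\n"] * len(cuts)
-- ===== Notes on version B (the rewrite author's own statement) =====
-- stated objective: alternative
-- what changed: Instead of one lockstep pass that slices at each newline while tracking last_end and appending to parts and seps together, B first collects the list of newline positions, derives explicit start/end boundary lists from it, slices each part from a zip of those boundaries, and builds seps by replication from the cut count.
import Mathlib
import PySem

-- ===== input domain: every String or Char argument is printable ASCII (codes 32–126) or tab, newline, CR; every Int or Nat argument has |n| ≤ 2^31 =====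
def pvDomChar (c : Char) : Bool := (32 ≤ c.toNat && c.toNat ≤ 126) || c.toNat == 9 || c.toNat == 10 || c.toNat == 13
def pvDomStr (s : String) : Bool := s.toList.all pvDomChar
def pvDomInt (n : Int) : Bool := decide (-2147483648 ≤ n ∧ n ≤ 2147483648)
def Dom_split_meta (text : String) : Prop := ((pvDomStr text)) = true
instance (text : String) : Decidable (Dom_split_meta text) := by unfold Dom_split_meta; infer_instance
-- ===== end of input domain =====

-- B replaces A's lockstep slice-at-each-newline loop by staged passes: collect newline
-- positions, derive start/end boundary lists, slice parts from their zip, replicate seps.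


-- ===== PORT A =====
-- the Python 'for i, c in enumerate(text)' loop over state (parts, seps, last_end)
def split_meta (text : String) : List String × List String :=
  let cs := text.toList
  let st := (PySem.List.enumerate cs).foldl
    (fun (s : List String × List String × Int) ic =>
      if ic.2 = '\n' then
        (s.1 ++ [String.ofList (PySem.List.slice cs (some s.2.2) (some ic.1))],
         s.2.1 ++ ["\n"], ic.1 + 1)
      else s)
    ([], [], 0)
  (st.1 ++ [String.ofList (PySem.List.slice cs (some st.2.2))], st.2.1)

-- ===== PORT B =====
-- cuts = [i for i,c in enumerate(text) if c == "\n"]; starts = [0] + [i+1 for i in cuts];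
-- ends = cuts + [len(text)]; parts = [text[s:e] for s,e in zip(starts, ends)]
def split_meta_alt (text : String) : List String × List String :=
  let cs := text.toList
  let cuts := ((PySem.List.enumerate cs).filter (fun ic => ic.2 == '\n')).map (·.1)
  let starts := (0 : Int) :: cuts.map (· + 1)
  let ends := cuts ++ [((cs.length : Nat) : Int)]
  let parts := (starts.zip ends).map
    (fun se => String.ofList (PySem.List.slice cs (some se.1) (some se.2)))
  (parts, List.replicate cuts.length "\n")

-- ===== PRECONDITION & SPEC =====
def Spec_split_meta (text : String) (out : List String × List String) : Prop := out = split_meta_alt text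
instance (text : String) (out : List String × List String) : Decidable (Spec_split_meta text out) := by unfold Spec_split_meta; infer_instance

-- ===== CLAIM (what is proved, stated in full; the proofs are below) =====
def Claim_equal_split_meta : Prop := ∀ (text : String), Dom_split_meta text → Spec_split_meta text (split_meta text)

-- ===== LEMMAS AND PROOFS =====

-- structural specification of splitting a char list on '\n'
def nlSplit : List Char → List (List Char)
  | [] => [[]]
  | c :: t => if c = '\n' then [] :: nlSplit t else (nlSplit t).modifyHead (c :: ·)

-- positions of '\n' in a char list
def nlIdx : List Char → List Nat
  | [] => []
  | c :: t => if c = '\n' then 0 :: (nlIdx t).map (· + 1) else (nlIdx t).map (· + 1)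

lemma nlSplit_ne_nil (l : List Char) : nlSplit l ≠ [] := by
  induction l with
  | nil => simp [nlSplit]
  | cons c t ih =>
    simp only [nlSplit]
    split_ifs
    · simp
    · cases h : nlSplit t with
      | nil => exact absurd h ih
      | cons a r => simp

lemma nlSplit_no_nl (seg : List Char) (h : '\n' ∉ seg) : nlSplit seg = [seg] := by
  induction seg with
  | nil => rfl
  | cons c t ih =>
    have hc : c ≠ '\n' := fun hc => h (hc ▸ List.mem_cons_self ..)
    simp only [nlSplit, if_neg hc, ih (fun ht => h (List.mem_cons_of_mem _ ht))]
    rfl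

lemma nlSplit_append_nl (seg t : List Char) (h : '\n' ∉ seg) :
    nlSplit (seg ++ '\n' :: t) = seg :: nlSplit t := by
  induction seg with
  | nil => simp [nlSplit]
  | cons c s ih =>
    have hc : c ≠ '\n' := fun hc => h (hc ▸ List.mem_cons_self ..)
    simp only [List.cons_append, nlSplit, if_neg hc,
      ih (fun ht => h (List.mem_cons_of_mem _ ht))]
    rfl

lemma nlIdx_no_nl (seg : List Char) (h : '\n' ∉ seg) : nlIdx seg = [] := by
  induction seg with
  | nil => rfl
  | cons c t ih =>
    have hc : c ≠ '\n' := fun hc => h (hc ▸ List.mem_cons_self ..)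
    simp [nlIdx, if_neg hc, ih (fun ht => h (List.mem_cons_of_mem _ ht))]

lemma nlIdx_append_nl (seg t : List Char) (h : '\n' ∉ seg) :
    nlIdx (seg ++ '\n' :: t) = seg.length :: (nlIdx t).map (· + (seg.length + 1)) := by
  induction seg with
  | nil => simp [nlIdx]
  | cons c s ih =>
    have hc : c ≠ '\n' := fun hc => h (hc ▸ List.mem_cons_self ..)
    simp only [List.cons_append, nlIdx, if_neg hc,
      ih (fun ht => h (List.mem_cons_of_mem _ ht))]
    simp only [List.map_cons, List.map_map, List.length_cons]
    refine congrArg₂ _ rfl (List.map_congr_left fun i _ => ?_)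
    simp only [Function.comp_apply]; omega

lemma nlSplit_length (t : List Char) : (nlSplit t).length = (nlIdx t).length + 1 := by
  induction t with
  | nil => rfl
  | cons c s ih =>
    by_cases hc : c = '\n'
    · simp [nlSplit, nlIdx, hc, ih]
    · simp [nlSplit, nlIdx, hc, ih, List.length_modifyHead]

-- every char list either has no '\n' or splits at its first '\n'
lemma nl_decomp (t : List Char) :
    '\n' ∉ t ∨ ∃ seg rest, t = seg ++ '\n' :: rest ∧ '\n' ∉ seg := by
  induction t with
  | nil => exact Or.inl (by simp)
  | cons c s ih =>
    by_cases hc : c = '\n'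
    · exact Or.inr ⟨[], s, by simp [hc], by simp⟩
    · rcases ih with h | ⟨seg, rest, hr, hs⟩
      · exact Or.inl (by simp [hc, h, Ne.symm])
      · exact Or.inr ⟨c :: seg, rest, by simp [hr], by simp [hc, hs, Ne.symm]⟩

-- filtering the enumeration for '\n' and keeping indices computes nlIdx (shifted by the start)
lemma enum_filter_nl (cs : List Char) : ∀ (n : Int),
    (((PySem.List.enumerate cs n).filter (fun ic => ic.2 == '\n')).map (·.1))
      = (nlIdx cs).map (fun i : Nat => ((i : Int) + n)) := by
  induction cs with
  | nil => intro n; rfl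
  | cons c t ih =>
    intro n
    rw [PySem.List.enumerate_cons, List.filter_cons]
    by_cases hc : c = '\n'
    · subst hc
      rw [if_pos (by simp), List.map_cons, ih (n + 1)]
      rw [show nlIdx ('\n' :: t) = 0 :: (nlIdx t).map (· + 1) from by simp [nlIdx],
        List.map_cons, List.map_map]
      refine List.cons_eq_cons.mpr ⟨by omega, List.map_congr_left fun i _ => ?_⟩
      simp only [Function.comp_apply]; push_cast; ring
    · rw [if_neg (by simpa using hc), ih (n + 1)]
      rw [show nlIdx (c :: t) = (nlIdx t).map (· + 1) from by simp [nlIdx, hc],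
        List.map_map]
      refine List.map_congr_left fun i _ => ?_
      simp only [Function.comp_apply]; push_cast; ring

-- the slice between two boundaries is the enclosed segment
lemma slice_mid (done seg rest : List Char) :
    PySem.List.slice (done ++ seg ++ rest) (some (done.length : Int))
      (some ((done.length + seg.length : Nat) : Int)) = seg := by
  rw [PySem.List.slice_natCast]
  rw [List.append_assoc, List.drop_left, Nat.add_sub_cancel_left, List.take_left]

-- the final slice is the trailing segment
lemma slice_tail (done seg : List Char) :
    PySem.List.slice (done ++ seg) (some (done.length : Int)) = seg := by
  rw [PySem.List.slice_from _ (by positivity)]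
  simp

-- B's zip-of-boundaries slicing computes nlSplit, for any prefix already consumed
lemma zip_slices (n : Nat) : ∀ (t pre : List Char), t.length ≤ n →
    ((((pre.length : Nat) : Int) ::
        ((nlIdx t).map (fun i => ((i + pre.length : Nat) : Int))).map (· + 1)).zip
      (((nlIdx t).map (fun i => ((i + pre.length : Nat) : Int))) ++
        [(((pre ++ t).length : Nat) : Int)])).map
      (fun se => PySem.List.slice (pre ++ t) (some se.1) (some se.2)) = nlSplit t := by
  induction n with
  | zero =>
    intro t pre h
    have ht : t = [] := List.length_eq_zero_iff.mp (Nat.le_zero.mp h)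
    subst ht
    simp [nlIdx, nlSplit, PySem.List.slice_natCast]
  | succ m ih =>
    intro t pre h
    rcases nl_decomp t with hno | ⟨seg, rest, hr, hseg⟩
    · rw [nlIdx_no_nl t hno, nlSplit_no_nl t hno]
      simp only [List.map_nil, List.nil_append, List.zip_cons_cons, List.zip_nil_right,
        List.map_cons, List.map_nil]
      rw [PySem.List.slice_natCast]
      rw [List.drop_left]
      rw [show (pre ++ t).length - pre.length = t.length from by simp]
      simp
    · subst hr
      rw [nlIdx_append_nl seg rest hseg, nlSplit_append_nl seg rest hseg]
      simp only [List.map_cons, List.map_map, List.cons_append, List.zip_cons_cons,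
        List.map_cons]
      have hrest : rest.length ≤ m := by
        have := h; simp only [List.length_append, List.length_cons] at this; omega
      refine List.cons_eq_cons.mpr ⟨?_, ?_⟩
      · -- head slice = seg
        rw [show ((seg.length + pre.length : Nat) : Int) = ((pre.length + seg.length : Nat) : Int) from by omega]
        rw [show pre ++ (seg ++ '\n' :: rest) = pre ++ seg ++ ('\n' :: rest) from by simp]
        exact slice_mid pre seg ('\n' :: rest)
      · -- tail slices = nlSplit rest, via ih with pre' = pre ++ seg ++ ['\n']
        have h2 := ih rest (pre ++ seg ++ ['\n']) hrest
        have hpre' : pre ++ (seg ++ '\n' :: rest) = pre ++ seg ++ ['\n'] ++ rest := by simp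
        have hlen : (pre ++ seg ++ ['\n']).length = pre.length + seg.length + 1 := by
          simp only [List.length_append, List.length_cons, List.length_nil]
        rw [hpre', ← h2]
        simp only [List.map_map]
        congr 1
        congr 1
        · refine List.cons_eq_cons.mpr ⟨by rw [hlen]; omega,
            List.map_congr_left fun i _ => by simp only [Function.comp_apply, hlen]; omega⟩
        · congr 1
          exact List.map_congr_left fun i _ => by simp only [Function.comp_apply, hlen]; omega

lemma enumerate_cons' (c : Char) (t : List Char) (n : Int) :
    PySem.List.enumerate (c :: t) n = (n, c) :: PySem.List.enumerate t (n + 1) := rfl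

-- main loop invariant for A's fold
lemma loop_spec (cs : List Char) :
    ∀ (suf done seg : List Char) (parts seps : List String),
    cs = done ++ seg ++ suf → '\n' ∉ seg →
    (let st := (PySem.List.enumerate suf ((done.length + seg.length : Nat) : Int)).foldl
      (fun (s : List String × List String × Int) ic =>
        if ic.2 = '\n' then
          (s.1 ++ [String.ofList (PySem.List.slice cs (some s.2.2) (some ic.1))],
           s.2.1 ++ ["\n"], ic.1 + 1)
        else s)
      (parts, seps, (done.length : Int));
    st.1 ++ [String.ofList (PySem.List.slice cs (some st.2.2))]
        = parts ++ (nlSplit (seg ++ suf)).map String.ofList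
      ∧ st.2.1 = seps ++ List.replicate ((nlSplit (seg ++ suf)).length - 1) "\n") := by
  intro suf
  induction suf with
  | nil =>
    intro done seg parts seps hcs hseg
    simp only [PySem.List.enumerate, List.foldl_nil]
    constructor
    · rw [List.append_nil] at hcs
      rw [hcs, slice_tail, List.append_nil, nlSplit_no_nl seg hseg]
      simp
    · rw [List.append_nil, nlSplit_no_nl seg hseg]
      simp
  | cons c t ih =>
    intro done seg parts seps hcs hseg
    rw [enumerate_cons']
    simp only [List.foldl_cons]
    by_cases hc : c = '\n'
    · subst hc
      rw [if_pos rfl]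
      have hsl : PySem.List.slice cs (some (done.length : Int))
          (some ((done.length + seg.length : Nat) : Int)) = seg := by
        rw [hcs]; exact slice_mid done seg ('\n' :: t)
      have hcast : ((done.length + seg.length : Nat) : Int) + 1
          = (((done ++ seg ++ ['\n']).length : Nat) : Int) := by
        simp; ring
      have h2 := ih (done ++ seg ++ ['\n']) [] (parts ++ [String.ofList seg]) (seps ++ ["\n"])
        (by rw [hcs]; simp) (by simp)
      rw [hsl, hcast]
      have hre : (((done ++ seg ++ ['\n']).length : Nat) : Int)
          = (((done ++ seg ++ ['\n']).length + ([] : List Char).length : Nat) : Int) := by simp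
      rw [show PySem.List.enumerate t (((done ++ seg ++ ['\n']).length : Nat) : Int)
          = PySem.List.enumerate t (((done ++ seg ++ ['\n']).length + ([] : List Char).length : Nat) : Int) from by rw [← hre]]
      refine ⟨?_, ?_⟩
      · rw [h2.1]
        rw [nlSplit_append_nl seg t hseg]
        simp
      · rw [h2.2]
        rw [nlSplit_append_nl seg t hseg]
        have hpos : 0 < (nlSplit t).length := List.length_pos_of_ne_nil (nlSplit_ne_nil t)
        simp only [List.nil_append, List.length_cons]
        rw [Nat.add_sub_cancel]
        rw [show (nlSplit t).length = ((nlSplit t).length - 1) + 1 from by omega]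
        simp [List.replicate_succ, List.append_assoc]
    · simp only [if_neg hc]
      have h2 := ih done (seg ++ [c]) parts seps
        (by rw [hcs]; simp) (by simp [hseg, Ne.symm, hc])
      have hidx : ((done.length + seg.length : Nat) : Int) + 1
          = ((done.length + (seg ++ [c]).length : Nat) : Int) := by simp; ring
      rw [hidx]
      refine ⟨?_, ?_⟩
      · rw [h2.1]; simp
      · rw [h2.2]; simp

-- ===== VERDICT (by name: the statement is the Claim_ definition above) =====
theorem split_meta_spec : Claim_equal_split_meta := by
  intro text _
  unfold Spec_split_meta split_meta split_meta_alt
  simp only []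
  have hA := loop_spec text.toList text.toList [] [] [] [] (by simp) (by simp)
  simp only [List.nil_append, List.length_nil, Nat.cast_zero, Nat.add_zero] at hA
  have hcuts := enum_filter_nl text.toList 0
  simp only [add_zero] at hcuts
  have hB := zip_slices text.toList.length text.toList [] (le_refl _)
  simp only [List.length_nil, List.nil_append, Nat.add_zero, Nat.cast_zero] at hB
  refine Prod.ext ?_ ?_
  · -- parts
    rw [hcuts]
    rw [show (fun se : Int × Int => String.ofList (PySem.List.slice text.toList (some se.1) (some se.2)))
        = String.ofList ∘ (fun se : Int × Int => PySem.List.slice text.toList (some se.1) (some se.2)) from rfl,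
      ← List.map_map, hB]
    simpa using hA.1
  · -- seps
    rw [hcuts, List.length_map]
    rw [show (nlIdx text.toList).length = (nlSplit text.toList).length - 1 from by
      have := nlSplit_length text.toList; omega]
    simpa using hA.2
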